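-- pv_equiv track=rewrite | github.com/ganzyukv/starlink-account-info | src/formatter.py | format_user_info
-- ===== SOURCE A (Python) =====
-- from typing import Dict, Any
--
-- def format_user_info(user: Dict[str, Any]) -> str:
--     lines = [
--         "=" * 70,
--         "\033[1;32mSTARLINK ACCOUNT INFORMATION\033[0m",
--         "=" * 70,
--         ""
--     ]
--
--     for key, value in user.items():
--         # camelCase -> Title Case
--         pretty_key = (
--             key.replace("Id", "ID")
--         )
--
--         formatted_key = ""
--         for i, ch in enumerate(pretty_key):
--             if i > 0 and ch.isupper() and not pretty_key[i-1].isupper():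
--                 formatted_key += " " + ch
--             else:
--                 formatted_key += ch
--
--         formatted_key = formatted_key[0].upper() + formatted_key[1:]
--         lines.append(f"{formatted_key}: {value}")
--
--     lines.append("=" * 70)
--
--     return "\n".join(lines)
-- ===== SOURCE B (Python) =====
-- def format_user_info(user):
--     bar = "=" * 70
--
--     def pretty(key):
--         pk = key.replace("Id", "ID")
--         # stage 1: boundary indices where a new word starts
--         cuts = [0] + [i for i in range(1, len(pk))
--                       if pk[i].isupper() and not pk[i - 1].isupper()] + [len(pk)]
--         # stage 2: slice the string at the cut points and join the pieces
--         spaced = " ".join(pk[a:b] for a, b in zip(cuts, cuts[1:]))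
--         return spaced[0].upper() + spaced[1:]
--
--     body = ["{}: {}".format(pretty(k), v) for k, v in user.items()]
--     return "\n".join([bar, "\033[1;32mSTARLINK ACCOUNT INFORMATION\033[0m", bar, ""] + body + [bar])
-- ===== Notes on version B (the rewrite author's own statement) =====
-- stated objective: alternative
-- what changed: A builds each spaced key char-by-char with a string accumulator and an index lookback inside one loop; B instead works in two staged passes: it first computes the list of word-boundary indices with a range/filter comprehension, then slices the key at those cut points and ' '.join-s the pieces, so no character accumulator exists at all; the report is assembled as a single '\n'.join over concatenated lists instead of successive appends.
import Mathlib
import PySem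

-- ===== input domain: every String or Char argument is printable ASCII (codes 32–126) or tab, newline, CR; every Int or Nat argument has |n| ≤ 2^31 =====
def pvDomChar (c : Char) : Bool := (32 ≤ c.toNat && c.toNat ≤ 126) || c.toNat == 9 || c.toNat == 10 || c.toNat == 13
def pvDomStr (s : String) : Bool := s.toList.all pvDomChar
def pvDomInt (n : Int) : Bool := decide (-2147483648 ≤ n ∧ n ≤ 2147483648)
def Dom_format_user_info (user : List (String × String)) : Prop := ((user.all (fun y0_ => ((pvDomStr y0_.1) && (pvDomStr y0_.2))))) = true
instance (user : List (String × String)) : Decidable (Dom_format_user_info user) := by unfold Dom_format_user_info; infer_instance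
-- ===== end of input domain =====

-- B replaces A's char-by-char accumulator loop with lookback indexing by two staged passes:
-- it first computes the word-boundary indices with a range/filter comprehension, then slices
-- the key at those cut points and joins the pieces with spaces (objective: alternative).
-- Equivalence is about the RETURN value; neither program mutates its argument.

-- shared literal constants ("=" * 70 and the ANSI header line)
def pvBar : List Char := List.replicate 70 '='
def pvHeader : List Char :=
  Char.ofNat 27 :: "[1;32mSTARLINK ACCOUNT INFORMATION".toList ++ Char.ofNat 27 :: "[0m".toList

-- ===== PORT A =====
-- body of A's inner `for i, ch in enumerate(pretty_key)` loop (string built by +=);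
-- pretty_key[i-1] is guarded by `i > 0`, so the .getD default is never read
def pv_stepA (pretty : List Char) (acc : List Char) (p : Int × Char) : List Char :=
  if decide (0 < p.1) && PySem.Chars.isupper p.2
      && !PySem.Chars.isupper ((PySem.List.pyGet? pretty (p.1 - 1)).getD ' ')
  then acc ++ [' ', p.2]
  else acc ++ [p.2]

def pv_lineA (p : String × String) : List Char :=
  let pretty := PySem.Chars.replace p.1.toList "Id".toList "ID".toList
  let formatted := (PySem.List.enumerate pretty 0).foldl (pv_stepA pretty) []
  -- formatted_key[0].upper() + formatted_key[1:] — Python raises IndexError on the empty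
  -- string; those inputs are excluded by Pre_format_user_info
  let capped := match formatted with
    | [] => []
    | c :: t => PySem.Chars.upperChar c :: t
  capped ++ ':' :: ' ' :: p.2.toList

def format_user_info (user : List (String × String)) : String :=
  let lines := [pvBar, pvHeader, pvBar, []]
  let lines := ((PySem.Dict.ofList user).items).foldl (fun ls p => ls ++ [pv_lineA p]) lines
  let lines := lines ++ [pvBar]
  String.ofList (PySem.Chars.join ['\n'] lines)

-- ===== PORT B =====
-- `pretty(key)` of Source B: stage 1 computes the cut-point list with a range/filter
-- comprehension (pk[i] is in range, so the .getD default is never read); stage 2 slices pk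
-- at consecutive cut points and joins the pieces with " ".
def pv_prettyB (key : List Char) : List Char :=
  let pk := PySem.Chars.replace key "Id".toList "ID".toList
  let cuts : List Int :=
    0 :: ((PySem.List.pyRange 1 (pk.length : Int) 1).filter
        (fun i => PySem.Chars.isupper ((PySem.List.pyGet? pk i).getD ' ')
               && !PySem.Chars.isupper ((PySem.List.pyGet? pk (i - 1)).getD ' '))
      ++ [(pk.length : Int)])
  let spaced := PySem.Chars.join [' ']
      ((cuts.zip cuts.tail).map (fun q => PySem.List.slice pk (some q.1) (some q.2)))
  -- spaced[0].upper() + spaced[1:] — Python raises IndexError on the empty string;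
  -- excluded by Pre_format_user_info
  match spaced with
  | [] => []
  | c :: t => PySem.Chars.upperChar c :: t

def format_user_info_alt (user : List (String × String)) : String :=
  let body := (PySem.Dict.ofList user).items.map (fun p => pv_prettyB p.1.toList ++ ':' :: ' ' :: p.2.toList)
  String.ofList (PySem.Chars.join ['\n'] ([pvBar, pvHeader, pvBar, []] ++ body ++ [pvBar]))

-- ===== PRECONDITION & SPEC =====
-- Pre_ excludes inputs containing an empty key, on which both Pythons raise IndexError.
def Pre_format_user_info (user : List (String × String)) : Prop :=
  (user.all (fun p => !(p.1 == ""))) = true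
instance (user : List (String × String)) : Decidable (Pre_format_user_info user) := by
  unfold Pre_format_user_info; infer_instance

def pvWitness_format_user_info : (List (String × String)) :=
  [("accountNumber", "ACC-123"), ("userId", "42")]

def Spec_format_user_info (user : List (String × String)) (out : String) : Prop := out = format_user_info_alt user
instance (user : List (String × String)) (out : String) : Decidable (Spec_format_user_info user out) := by unfold Spec_format_user_info; infer_instance

-- ===== CLAIM (what is proved, stated in full; the proofs are below) =====
def Claim_equal_format_user_info : Prop := ∀ (user : List (String × String)), Dom_format_user_info user → Pre_format_user_info user → Spec_format_user_info user (format_user_info user)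

-- ===== LEMMAS AND PROOFS =====

-- the spacing pass, expressed recursively: prev is the previous character
def pvGo (prev : Char) : List Char → List Char
  | [] => []
  | c :: t => (if PySem.Chars.isupper c && !PySem.Chars.isupper prev then [' ', c] else [c]) ++ pvGo c t

-- word-boundary offsets into the tail t of pk = c :: t, given the previous character
def pvF (prev : Char) : List Char → List Nat
  | [] => []
  | d :: u => (if PySem.Chars.isupper d && !PySem.Chars.isupper prev then [0] else [])
                ++ (pvF d u).map (· + 1)

-- B's cut list and slice list over Nat indices
def pvCutsN (bs : List Nat) (n : Nat) : List Nat := 0 :: (bs.map (· + 1) ++ [n])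

def pvSlices (pk : List Char) (bs : List Nat) : List (List Char) :=
  ((pvCutsN bs pk.length).zip (pvCutsN bs pk.length).tail).map
    (fun q => PySem.List.slice pk (some (q.1 : Int)) (some (q.2 : Int)))

-- ===== A-side: the accumulator loop is pvGo =====

lemma pv_stepA_aux (suf : List Char) :
    ∀ (pre acc : List Char) (prev : Char), pre.getLast? = some prev →
      (PySem.List.enumerate suf (pre.length : Int)).foldl (pv_stepA (pre ++ suf)) acc
        = acc ++ pvGo prev suf := by
  induction suf with
  | nil => intro pre acc prev _; simp [PySem.List.enumerate, pvGo]
  | cons c t ih =>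
      intro pre acc prev hlast
      have hpre : pre ≠ [] := by rintro rfl; simp at hlast
      have hpos : 0 < pre.length := List.length_pos_iff.mpr hpre
      have hidx : PySem.List.pyGet? (pre ++ c :: t) ((pre.length : Int) - 1) = some prev := by
        have h1 : ((pre.length : Int) - 1) = ((pre.length - 1 : Nat) : Int) := by omega
        rw [h1, PySem.List.pyGet?_natCast, List.getElem?_append_left (by omega)]
        rw [← List.getLast?_eq_getElem?]; exact hlast
      have hstep : pv_stepA (pre ++ c :: t) acc ((pre.length : Int), c)
          = acc ++ (if PySem.Chars.isupper c && !PySem.Chars.isupper prev then [' ', c] else [c]) := by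
        simp only [pv_stepA, hidx]
        have : decide (0 < (pre.length : Int)) = true := by simp; omega
        simp only [this, Bool.true_and, Option.getD_some]
        split_ifs <;> simp
      rw [PySem.List.enumerate_cons, List.foldl_cons, hstep]
      have hlen : ((pre.length : Int) + 1) = (((pre ++ [c]).length : Nat) : Int) := by
        simp
      have happ : pre ++ c :: t = (pre ++ [c]) ++ t := by simp
      rw [hlen, happ, ih (pre ++ [c]) _ c (by simp)]
      simp [pvGo]

lemma pv_loopA (pk : List Char) :
    (PySem.List.enumerate pk 0).foldl (pv_stepA pk) []
      = match pk with
        | [] => []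
        | c :: t => c :: pvGo c t := by
  cases pk with
  | nil => simp [PySem.List.enumerate]
  | cons c t =>
      rw [PySem.List.enumerate_cons, List.foldl_cons]
      have h0 : pv_stepA (c :: t) [] (0, c) = [c] := by simp [pv_stepA]
      rw [h0]
      have h1 : (0 : Int) + 1 = (([c].length : Nat) : Int) := by simp
      have := pv_stepA_aux t [c] [c] c (by simp)
      simpa [h1] using this

-- ===== B-side, stage 1: the range/filter comprehension computes pvF =====

lemma pv_filter_aux (suf : List Char) :
    ∀ (pre : List Char) (prev : Char), pre.getLast? = some prev →
      (PySem.List.pyRange (pre.length : Int) (((pre ++ suf).length : Nat) : Int) 1).filter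
          (fun i => PySem.Chars.isupper ((PySem.List.pyGet? (pre ++ suf) i).getD ' ')
                 && !PySem.Chars.isupper ((PySem.List.pyGet? (pre ++ suf) (i - 1)).getD ' '))
        = (pvF prev suf).map (fun j => ((pre.length + j : Nat) : Int)) := by
  induction suf with
  | nil =>
      intro pre prev _
      simp [PySem.List.pyRange_one_eq_nil, pvF]
  | cons d u ih =>
      intro pre prev hlast
      have hpre : pre ≠ [] := by rintro rfl; simp at hlast
      have hpos : 0 < pre.length := List.length_pos_iff.mpr hpre
      have hlt : (pre.length : Int) < (((pre ++ d :: u).length : Nat) : Int) := by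
        simp
      rw [PySem.List.pyRange_one_cons hlt, List.filter_cons]
      have hd : PySem.List.pyGet? (pre ++ d :: u) (pre.length : Int) = some d := by
        rw [PySem.List.pyGet?_natCast, List.getElem?_append_right (le_refl _)]
        simp
      have hprev : PySem.List.pyGet? (pre ++ d :: u) ((pre.length : Int) - 1) = some prev := by
        have h1 : ((pre.length : Int) - 1) = ((pre.length - 1 : Nat) : Int) := by omega
        rw [h1, PySem.List.pyGet?_natCast, List.getElem?_append_left (by omega)]
        rw [← List.getLast?_eq_getElem?]; exact hlast
      have hrest :
          (PySem.List.pyRange ((pre.length : Int) + 1) (((pre ++ d :: u).length : Nat) : Int) 1).filter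
              (fun i => PySem.Chars.isupper ((PySem.List.pyGet? (pre ++ d :: u) i).getD ' ')
                     && !PySem.Chars.isupper ((PySem.List.pyGet? (pre ++ d :: u) (i - 1)).getD ' '))
            = (pvF d u).map (fun j => (((pre ++ [d]).length + j : Nat) : Int)) := by
        have happ : pre ++ d :: u = (pre ++ [d]) ++ u := by simp
        have hlen : ((pre.length : Int) + 1) = (((pre ++ [d]).length : Nat) : Int) := by simp
        rw [hlen, happ]
        exact ih (pre ++ [d]) d (by simp)
      have hmap : (pvF d u).map (fun j => (((pre ++ [d]).length + j : Nat) : Int))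
          = ((pvF d u).map (· + 1)).map (fun j => ((pre.length + j : Nat) : Int)) := by
        rw [List.map_map]
        exact List.map_congr_left (fun j _ => by simp; omega)
      simp only [hd, hprev, Option.getD_some]
      rw [hrest, hmap]
      simp only [pvF, List.map_append]
      cases hb : (PySem.Chars.isupper d && !PySem.Chars.isupper prev) with
      | true => simp
      | false => simp

-- ===== B-side, stage 2: slicing at the cut points and joining is pvGo =====

lemma pv_slice_succ (c : Char) (t : List Char) (a b : Nat) :
    PySem.List.slice (c :: t) (some ((a + 1 : Nat) : Int)) (some ((b + 1 : Nat) : Int))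
      = PySem.List.slice t (some (a : Int)) (some (b : Int)) := by
  rw [PySem.List.slice_natCast, PySem.List.slice_natCast]
  simp [Nat.succ_sub_succ]

lemma pv_slices_shift (t : List Char) (c : Char) (cuts : List Nat) :
    (((cuts.map (· + 1)).zip (cuts.map (· + 1)).tail).map
        (fun (q : Nat × Nat) => PySem.List.slice (c :: t) (some (q.1 : Int)) (some (q.2 : Int))))
      = (cuts.zip cuts.tail).map (fun (q : Nat × Nat) => PySem.List.slice t (some (q.1 : Int)) (some (q.2 : Int))) := by
  rw [← List.map_tail, List.zip_map, List.map_map]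
  exact List.map_congr_left (fun q _ => pv_slice_succ c t q.1 q.2)

lemma pv_slices_ne_nil (pk : List Char) (bs : List Nat) : pvSlices pk bs ≠ [] := by
  unfold pvSlices pvCutsN
  cases h : bs.map (· + 1) ++ [pk.length] with
  | nil => simp at h
  | cons x r => simp [List.zip_cons_cons]

-- the tail of pvCutsN, shared by both branches of the induction below
def pvCT (bs : List Nat) (n : Nat) : List Nat := bs.map (· + 1) ++ [n]

lemma pv_join_cons_head (S0 : List Char) (Rest : List (List Char)) (c : Char) :
    PySem.Chars.join [' '] ((c :: S0) :: Rest) = c :: PySem.Chars.join [' '] (S0 :: Rest) := by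
  cases Rest with
  | nil => rw [PySem.Chars.join_singleton, PySem.Chars.join_singleton]
  | cons R Rs => rw [PySem.Chars.join_cons_cons, PySem.Chars.join_cons_cons]; simp

lemma pv_join_slices (t : List Char) : ∀ (c : Char),
    PySem.Chars.join [' '] (pvSlices (c :: t) (pvF c t)) = c :: pvGo c t := by
  induction t with
  | nil =>
      intro c
      have h1 : pvSlices [c] (pvF c [])
          = [PySem.List.slice [c] (some ((0 : Nat) : Int)) (some ((1 : Nat) : Int))] := rfl
      have h2 : PySem.List.slice [c] (some ((0 : Nat) : Int)) (some ((1 : Nat) : Int)) = [c] := by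
        rw [PySem.List.slice_natCast]; rfl
      rw [h1, h2, PySem.Chars.join_singleton]; rfl
  | cons d u ih =>
      intro c
      -- shared pieces
      have hct : pvCutsN (pvF d u) (d :: u).length = 0 :: pvCT (pvF d u) (d :: u).length := rfl
      have hne := pv_slices_ne_nil (d :: u) (pvF d u)
      obtain ⟨S, Rest, hSR⟩ : ∃ S Rest, pvSlices (d :: u) (pvF d u) = S :: Rest := by
        cases h : pvSlices (d :: u) (pvF d u) with
        | nil => exact absurd h hne
        | cons S Rest => exact ⟨S, Rest, rfl⟩
      cases hb : (PySem.Chars.isupper d && !PySem.Chars.isupper c) with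
      | true =>
          have hcuts : pvCutsN (pvF c (d :: u)) (c :: d :: u).length
              = 0 :: (pvCutsN (pvF d u) (d :: u).length).map (· + 1) := by
            simp only [pvCutsN, pvF, hb, if_pos, List.map_append, List.map_map]
            simp [Function.comp_def, List.length_cons]
          have hm1 : (pvCutsN (pvF d u) (d :: u).length).map (· + 1)
              = 1 :: (pvCT (pvF d u) (d :: u).length).map (· + 1) := by
            rw [hct]; simp
          have hslices : pvSlices (c :: d :: u) (pvF c (d :: u))
              = PySem.List.slice (c :: d :: u) (some ((0 : Nat) : Int)) (some ((1 : Nat) : Int))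
                :: pvSlices (d :: u) (pvF d u) := by
            unfold pvSlices
            have htl : (pvCT (pvF d u) (d :: u).length).map (· + 1)
                = ((pvCutsN (pvF d u) (d :: u).length).map (· + 1)).tail := by
              rw [hct]; rfl
            rw [hcuts, hm1, List.tail_cons, List.zip_cons_cons, List.map_cons]
            congr 1
            rw [htl]
            exact pv_slices_shift (d :: u) c (pvCutsN (pvF d u) (d :: u).length)
          have hfirst : PySem.List.slice (c :: d :: u) (some ((0 : Nat) : Int)) (some ((1 : Nat) : Int)) = [c] := by
            rw [PySem.List.slice_natCast]; rfl
          rw [hslices, hfirst, hSR, PySem.Chars.join_cons_cons, ← hSR, ih]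
          simp [pvGo, hb]
      | false =>
          have hcuts : pvCutsN (pvF c (d :: u)) (c :: d :: u).length
              = 0 :: (pvCT (pvF d u) (d :: u).length).map (· + 1) := by
            simp only [pvCutsN, pvCT, pvF, hb, List.map_append, List.map_map]
            simp [Function.comp_def, List.length_cons]
          obtain ⟨h, r, hhr⟩ : ∃ h r, pvCT (pvF d u) (d :: u).length = h :: r := by
            cases hx : pvCT (pvF d u) (d :: u).length with
            | nil => exact absurd hx (by simp [pvCT])
            | cons h r => exact ⟨h, r, rfl⟩
          have hslices : pvSlices (c :: d :: u) (pvF c (d :: u))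
              = PySem.List.slice (c :: d :: u) (some ((0 : Nat) : Int)) (some ((h + 1 : Nat) : Int))
                :: ((pvCT (pvF d u) (d :: u).length).zip (pvCT (pvF d u) (d :: u).length).tail).map
                    (fun (q : Nat × Nat) => PySem.List.slice (d :: u) (some (q.1 : Int)) (some (q.2 : Int))) := by
            unfold pvSlices
            rw [hcuts]
            have hm1 : (pvCT (pvF d u) (d :: u).length).map (· + 1) = (h + 1) :: r.map (· + 1) := by
              rw [hhr]; rfl
            have htl : r.map (· + 1) = ((pvCT (pvF d u) (d :: u).length).map (· + 1)).tail := by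
              rw [hhr]; rfl
            rw [hm1, List.tail_cons, List.zip_cons_cons, List.map_cons]
            congr 1
            rw [← hm1, htl]
            exact pv_slices_shift (d :: u) c (pvCT (pvF d u) (d :: u).length)
          have htslices : pvSlices (d :: u) (pvF d u)
              = PySem.List.slice (d :: u) (some ((0 : Nat) : Int)) (some ((h : Nat) : Int))
                :: ((pvCT (pvF d u) (d :: u).length).zip (pvCT (pvF d u) (d :: u).length).tail).map
                    (fun (q : Nat × Nat) => PySem.List.slice (d :: u) (some (q.1 : Int)) (some (q.2 : Int))) := by
            unfold pvSlices
            rw [hct, hhr, List.tail_cons, List.zip_cons_cons, List.map_cons, ← hhr]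
            rw [hhr, List.tail_cons]
          have hfirst : PySem.List.slice (c :: d :: u) (some ((0 : Nat) : Int)) (some ((h + 1 : Nat) : Int))
              = c :: PySem.List.slice (d :: u) (some ((0 : Nat) : Int)) (some ((h : Nat) : Int)) := by
            rw [PySem.List.slice_natCast, PySem.List.slice_natCast]
            simp [List.take_succ_cons]
          rw [hslices, hfirst, pv_join_cons_head, ← htslices, ih]
          simp [pvGo, hb]

-- casting the Int cut list of the port to the Nat cut list pvCutsN
lemma pv_cast_zip (pk : List Char) (l : List Nat) :
    (((l.map (fun (n : Nat) => (n : Int))).zip (l.map (fun (n : Nat) => (n : Int))).tail).map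
        (fun (q : Int × Int) => PySem.List.slice pk (some q.1) (some q.2)))
      = (l.zip l.tail).map (fun (q : Nat × Nat) => PySem.List.slice pk (some (q.1 : Int)) (some (q.2 : Int))) := by
  rw [← List.map_tail, List.zip_map, List.map_map]
  exact List.map_congr_left (fun q _ => rfl)

-- pv_filter_aux at pre = [c], stated in the port's own syntax
lemma pv_filter_top (t : List Char) (c : Char) :
    (PySem.List.pyRange 1 (((c :: t).length : Nat) : Int) 1).filter
        (fun i => PySem.Chars.isupper ((PySem.List.pyGet? (c :: t) i).getD ' ')
               && !PySem.Chars.isupper ((PySem.List.pyGet? (c :: t) (i - 1)).getD ' '))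
      = (pvF c t).map (fun j => ((1 + j : Nat) : Int)) :=
  pv_filter_aux t [c] c rfl

lemma pv_prettyB_eq (key : List Char) :
    pv_prettyB key
      = (match PySem.Chars.replace key "Id".toList "ID".toList with
         | [] => []
         | c :: t => PySem.Chars.upperChar c :: pvGo c t) := by
  cases hpk : PySem.Chars.replace key "Id".toList "ID".toList with
  | nil => simp only [pv_prettyB, hpk]; rfl
  | cons c t =>
      simp only [pv_prettyB, hpk]
      rw [pv_filter_top]
      have hcast : (0 : Int) :: ((pvF c t).map (fun j => ((1 + j : Nat) : Int)) ++ [((c :: t).length : Int)])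
          = (pvCutsN (pvF c t) (c :: t).length).map (fun (n : Nat) => (n : Int)) := by
        simp only [pvCutsN, List.map_cons, List.map_append, List.map_map, Nat.cast_zero]
        congr 1
        congr 1
        exact List.map_congr_left (fun j _ => by simp [Nat.add_comm])
      rw [hcast, pv_cast_zip]
      rw [show (List.map (fun (q : Nat × Nat) => PySem.List.slice (c :: t) (some (q.1 : Int)) (some (q.2 : Int)))
            ((pvCutsN (pvF c t) (c :: t).length).zip (pvCutsN (pvF c t) (c :: t).length).tail))
          = pvSlices (c :: t) (pvF c t) from rfl, pv_join_slices]

lemma pv_line_eq (p : String × String) :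
    pv_lineA p = pv_prettyB p.1.toList ++ ':' :: ' ' :: p.2.toList := by
  unfold pv_lineA
  dsimp only
  rw [pv_loopA, pv_prettyB_eq]
  cases h : PySem.Chars.replace p.1.toList "Id".toList "ID".toList with
  | nil => rfl
  | cons c t => rfl

lemma pv_foldl_append {α β : Type} (g : α → β) :
    ∀ (l : List α) (init : List β), l.foldl (fun ls p => ls ++ [g p]) init = init ++ l.map g := by
  intro l
  induction l with
  | nil => simp
  | cons x xs ih => intro init; simp [ih]

-- ===== VERDICT (by name: the statement is the Claim_ definition above) =====
theorem format_user_info_spec : Claim_equal_format_user_info := by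
  intro user _ _
  unfold Spec_format_user_info format_user_info format_user_info_alt
  dsimp only
  rw [pv_foldl_append pv_lineA]
  have : (PySem.Dict.ofList user).items.map pv_lineA
      = (PySem.Dict.ofList user).items.map (fun p => pv_prettyB p.1.toList ++ ':' :: ' ' :: p.2.toList) :=
    List.map_congr_left (fun p _ => pv_line_eq p)
  simp [this]
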